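-- pv_equiv track=rewrite | github.com/ninepig/leecode_dd_2024 | zdd/ddlastRound/ddHighChance/chefOrderScaleProift.py | getMaxPorift
-- ===== SOURCE A (Python) =====
-- def getMaxPorift(chefs:list[int],orderScale:list[int],orderProfit:list[int])->int:
--     if not chefs or not orderScale or not orderProfit :
--         return 0
--     if len(chefs)==0 or len(orderScale)== 0 or len(orderProfit) == 0 or len(orderProfit) != len(orderScale):
--         return 0
--     scale_profit = sorted(zip(orderScale,orderProfit),key=lambda x:x[0]) ## get orderScale, Profit tuple, sorted with scale aseding
--     idx = 0
--     res = 0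
--     best = 0 ## profit  chef can get most under his scale
--     for chef in sorted(chefs):
--         ## 这里必须是 》= 因为difficult 可能duplicated，
--         while idx < len(scale_profit) and chef >= scale_profit[idx][0]: ## find most profit under his scale
--             best = max(best,scale_profit[idx][1]) ##profit如果和难度不线性,所以只要这里best 是取max的情况下 就能满足
--             ## 因为 best根据能做的保证最大， chef是sort以后的。所以这样肯定满足
--             idx += 1
--         res += best
--
--     return res
-- ===== SOURCE B (Python) =====
-- def getMaxPorift(chefs: list[int], orderScale: list[int], orderProfit: list[int]) -> int:
--     if not chefs or not orderScale or not orderProfit: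
--         return 0
--     if len(chefs) == 0 or len(orderScale) == 0 or len(orderProfit) == 0 or len(orderProfit) != len(orderScale):
--         return 0
--     jobs = sorted(zip(orderScale, orderProfit), key=lambda x: x[0])
--     diffs = [d for d, _ in jobs]
--     # prefmax[k] = best profit among the k easiest jobs (prefmax[0] = 0)
--     prefmax = [0]
--     cur = 0
--     for _, p in jobs:
--         cur = max(cur, p)
--         prefmax.append(cur)
--     n = len(diffs)
--     res = 0
--     for chef in chefs:  # no sorting of chefs: each chef gets an independent binary search
--         lo, hi = 0, n
--         while lo < hi:
--             mid = (lo + hi) // 2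
--             if diffs[mid] <= chef:
--                 lo = mid + 1
--             else:
--                 hi = mid
--         res += prefmax[lo]
--     return res
-- ===== Notes on version B (the rewrite author's own statement) =====
-- stated objective: alternative
-- what changed: Replaces A's sort-the-chefs monotone two-pointer sweep (shared running best) by a prefix-max table over the difficulty-sorted jobs plus an independent hand-written binary search per chef, so the chefs are never sorted.
import Mathlib
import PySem

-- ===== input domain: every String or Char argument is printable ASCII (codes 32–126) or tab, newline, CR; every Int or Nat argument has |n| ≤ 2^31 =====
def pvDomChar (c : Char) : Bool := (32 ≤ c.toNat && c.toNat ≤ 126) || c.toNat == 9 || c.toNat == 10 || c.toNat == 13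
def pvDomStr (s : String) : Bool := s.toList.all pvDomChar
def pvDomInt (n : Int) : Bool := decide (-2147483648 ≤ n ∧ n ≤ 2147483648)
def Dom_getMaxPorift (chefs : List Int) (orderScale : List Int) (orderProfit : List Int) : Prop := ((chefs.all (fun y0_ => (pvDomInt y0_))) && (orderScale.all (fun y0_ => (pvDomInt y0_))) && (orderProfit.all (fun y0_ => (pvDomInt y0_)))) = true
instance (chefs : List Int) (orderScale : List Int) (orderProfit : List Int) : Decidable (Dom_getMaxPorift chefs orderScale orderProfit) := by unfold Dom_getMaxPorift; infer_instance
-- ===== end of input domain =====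

-- B replaces A's sorted-chefs two-pointer sweep by a prefix-max table over the sorted jobs
-- plus one binary search per (unsorted) chef; same return value on every input (both are total).

-- ===== PORT A =====
-- the inner `while idx < len(scale_profit) and chef >= scale_profit[idx][0]` loop,
-- with the not-yet-consumed suffix of scale_profit standing for the index idx
def aWhile (chef : Int) : List (Int × Int) → Int → List (Int × Int) × Int
  | [], best => ([], best)
  | q :: rest, best =>
      if chef ≥ q.1 then aWhile chef rest (max best q.2) else (q :: rest, best)

def getMaxPorift (chefs : List Int) (orderScale : List Int) (orderProfit : List Int) : Int :=
  if chefs = [] ∨ orderScale = [] ∨ orderProfit = [] then 0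
  else if chefs.length = 0 ∨ orderScale.length = 0 ∨ orderProfit.length = 0 ∨
      orderProfit.length ≠ orderScale.length then 0
  else
    let scale_profit := PySem.List.sorted (orderScale.zip orderProfit) (fun x => x.1) false
    -- state: (remaining suffix of scale_profit, res, best)
    let st := (PySem.List.sorted chefs (fun x => x) false).foldl
        (fun (s : List (Int × Int) × Int × Int) chef =>
          let w := aWhile chef s.1 s.2.2
          (w.1, s.2.1 + w.2, w.2))
        (scale_profit, 0, 0)
    st.2.1

-- ===== PORT B =====
-- the `while lo < hi` binary-search loop of Source B (diffs[mid] is in range, so getD is exact)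
def brLoop (diffs : List Int) (chef : Int) (lo hi : Nat) : Nat :=
  if _h : lo < hi then
    let mid := (lo + hi) / 2
    if diffs.getD mid 0 ≤ chef then brLoop diffs chef (mid + 1) hi
    else brLoop diffs chef lo mid
  else lo
termination_by hi - lo
decreasing_by all_goals omega

def getMaxPorift_alt (chefs : List Int) (orderScale : List Int) (orderProfit : List Int) : Int :=
  if chefs = [] ∨ orderScale = [] ∨ orderProfit = [] then 0
  else if chefs.length = 0 ∨ orderScale.length = 0 ∨ orderProfit.length = 0 ∨
      orderProfit.length ≠ orderScale.length then 0
  else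
    let jobs := PySem.List.sorted (orderScale.zip orderProfit) (fun x => x.1) false
    let diffs := jobs.map (fun q => q.1)
    -- prefmax built appending max(cur, p); state (prefmax, cur)
    let pm := jobs.foldl (fun (s : List Int × Int) q =>
        let cur := max s.2 q.2
        (s.1 ++ [cur], cur)) ([0], 0)
    let prefmax := pm.1
    let n := diffs.length
    -- prefmax[lo] with lo ≤ n < len(prefmax): in range, so getD is exact
    chefs.foldl (fun res chef => res + prefmax.getD (brLoop diffs chef 0 n) 0) 0

-- ===== PRECONDITION & SPEC =====
def Spec_getMaxPorift (chefs : List Int) (orderScale : List Int) (orderProfit : List Int) (out : Int) : Prop := out = getMaxPorift_alt chefs orderScale orderProfit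
instance (chefs : List Int) (orderScale : List Int) (orderProfit : List Int) (out : Int) : Decidable (Spec_getMaxPorift chefs orderScale orderProfit out) := by unfold Spec_getMaxPorift; infer_instance

-- ===== CLAIM (what is proved, stated in full; the proofs are below) =====
def Claim_equal_getMaxPorift : Prop := ∀ (chefs : List Int) (orderScale : List Int) (orderProfit : List Int), Dom_getMaxPorift chefs orderScale orderProfit → Spec_getMaxPorift chefs orderScale orderProfit (getMaxPorift chefs orderScale orderProfit)

-- ===== LEMMAS AND PROOFS =====
def pcond (c : Int) : Int × Int → Bool := fun q => decide (q.1 ≤ c)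
def bestOf (sp : List (Int × Int)) (c : Int) : Int :=
  ((sp.takeWhile (pcond c)).map Prod.snd).foldl max 0
theorem aWhile_eq (c : Int) : ∀ (rem : List (Int × Int)) (b : Int),
    aWhile c rem b = (rem.dropWhile (pcond c), ((rem.takeWhile (pcond c)).map Prod.snd).foldl max b) := by
  intro rem
  induction rem with
  | nil => intro b; simp [aWhile]
  | cons q rest ih =>
    intro b
    by_cases h : q.1 ≤ c
    · simp [aWhile, pcond, h, ih]
    · simp [aWhile, pcond, h]
theorem takeWhile_split {α : Type} (q r : α → Bool) (h : ∀ x, q x = true → r x = true) :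
    ∀ l : List α, l.takeWhile r = l.takeWhile q ++ (l.dropWhile q).takeWhile r := by
  intro l
  induction l with
  | nil => simp
  | cons x t ih =>
    by_cases hq : q x = true
    · simp [hq, h x hq, ih]
    · simp [List.takeWhile_cons, hq]
theorem dropWhile_compose {α : Type} (q r : α → Bool) (h : ∀ x, q x = true → r x = true) :
    ∀ l : List α, l.dropWhile r = (l.dropWhile q).dropWhile r := by
  intro l
  induction l with
  | nil => simp
  | cons x t ih =>
    by_cases hq : q x = true
    · simp [hq, h x hq, ih]
    · simp [hq]

theorem loopA (sp : List (Int × Int)) :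
    ∀ (cs : List Int) (q : Int × Int → Bool) (res0 : Int),
    cs.Pairwise (· ≤ ·) → (∀ c ∈ cs, ∀ x : Int × Int, q x = true → x.1 ≤ c) →
    (cs.foldl (fun (s : List (Int × Int) × Int × Int) chef =>
        let w := aWhile chef s.1 s.2.2
        (w.1, s.2.1 + w.2, w.2))
      (sp.dropWhile q, res0, ((sp.takeWhile q).map Prod.snd).foldl max 0)).2.1
    = res0 + (cs.map (bestOf sp)).sum := by
  intro cs
  induction cs with
  | nil => intro q res0 _ _; simp
  | cons c cs ih =>
    intro q res0 hpw hq
    have hqc : ∀ x : Int × Int, q x = true → pcond c x = true := by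
      intro x hx
      simpa [pcond] using hq c (by simp) x hx
    simp only [List.foldl_cons]
    rw [aWhile_eq]
    have hdrop : (sp.dropWhile q).dropWhile (pcond c) = sp.dropWhile (pcond c) :=
      (dropWhile_compose q (pcond c) hqc sp).symm
    have htake : ((sp.dropWhile q).takeWhile (pcond c)) =
        (sp.takeWhile (pcond c)).drop (sp.takeWhile q).length := by
      rw [takeWhile_split q (pcond c) hqc sp]
      simp
    have hbest : ((((sp.dropWhile q).takeWhile (pcond c)).map Prod.snd).foldl max
        (((sp.takeWhile q).map Prod.snd).foldl max 0)) = bestOf sp c := by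
      rw [← List.foldl_append, ← List.map_append, ← takeWhile_split q (pcond c) hqc sp]
      rfl
    rw [hbest, hdrop]
    have hrec := ih (pcond c) (res0 + bestOf sp c) (hpw.sublist (by simp)) ?_
    · rw [show ((sp.takeWhile (pcond c)).map Prod.snd).foldl max 0 = bestOf sp c from rfl] at hrec
      simpa [add_assoc] using hrec
    · intro c' hc' x hx
      have h1 : x.1 ≤ c := by simpa [pcond] using hx
      have h2 : c ≤ c' := (List.pairwise_cons.mp hpw).1 c' hc'
      omega

theorem takeWhile_lt (d : List Int) (p : Int → Bool) :
    ∀ i, i < (d.takeWhile p).length → p (d.getD i 0) = true := by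
  induction d with
  | nil => simp
  | cons x t ih =>
    intro i hi
    by_cases hp : p x = true
    · cases i with
      | zero => simpa using hp
      | succ i =>
        simp only [List.takeWhile_cons, hp] at hi
        simp only [if_true] at hi
        exact ih i (by simpa using hi)
    · simp [hp] at hi

theorem takeWhile_ge (d : List Int) (c : Int) (hs : d.Pairwise (· ≤ ·)) :
    ∀ i, (d.takeWhile (fun x => decide (x ≤ c))).length ≤ i → i < d.length →
      (decide ((d.getD i 0) ≤ c)) = false := by
  induction d with
  | nil => simp
  | cons x t ih =>
    intro i hti hlen
    have hpw := List.pairwise_cons.mp hs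
    by_cases hp : x ≤ c
    · cases i with
      | zero => simp [hp] at hti
      | succ i =>
        simp only [List.takeWhile_cons, decide_eq_true hp, if_true, List.length_cons] at hti
        exact ih hpw.2 i (by omega) (by simpa using hlen)
    · -- head already fails: every element of index i is ≥ x > c
      cases i with
      | zero => simpa using hp
      | succ i =>
        have hlt : i < t.length := by simpa using hlen
        rw [List.getD_cons_succ, List.getD_eq_getElem _ _ hlt]
        have := hpw.1 _ (List.getElem_mem hlt)
        simp
        omega

theorem brLoop_eq (d : List Int) (c : Int) (hs : d.Pairwise (· ≤ ·)) :
    ∀ (fuel lo hi : Nat), hi - lo ≤ fuel →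
    lo ≤ (d.takeWhile (fun x => decide (x ≤ c))).length →
    (d.takeWhile (fun x => decide (x ≤ c))).length ≤ hi → hi ≤ d.length →
    brLoop d c lo hi = (d.takeWhile (fun x => decide (x ≤ c))).length := by
  intro fuel
  induction fuel with
  | zero =>
    intro lo hi h1 h2 h3 h4
    rw [brLoop]
    rw [dif_neg (by omega)]
    omega
  | succ fuel ih =>
    intro lo hi h1 h2 h3 h4
    rw [brLoop]
    by_cases hlh : lo < hi
    · rw [dif_pos hlh]
      have hmlo : lo ≤ (lo + hi) / 2 := by omega
      have hmhi : (lo + hi) / 2 < hi := by omega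
      by_cases hm : d.getD ((lo + hi) / 2) 0 ≤ c
      · rw [if_pos hm]
        have hlt : (lo + hi) / 2 < (d.takeWhile (fun x => decide (x ≤ c))).length := by
          by_contra hge
          have h5 := takeWhile_ge d c hs ((lo + hi) / 2) (by omega) (by omega)
          rw [decide_eq_false_iff_not] at h5
          exact h5 hm
        exact ih _ _ (by omega) (by omega) h3 h4
      · rw [if_neg hm]
        have hge : (d.takeWhile (fun x => decide (x ≤ c))).length ≤ (lo + hi) / 2 := by
          by_contra hlt
          have h5 := takeWhile_lt d (fun x => decide (x ≤ c)) ((lo + hi) / 2) (by omega)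
          rw [decide_eq_true_iff] at h5
          exact hm h5
        exact ih _ _ (by omega) h2 (by omega) (by omega)
    · rw [dif_neg hlh]
      omega

def pmSpine (cur : Int) : List (Int × Int) → List Int
  | [] => []
  | q :: t => max cur q.2 :: pmSpine (max cur q.2) t

theorem foldl_pm : ∀ (sp : List (Int × Int)) (acc : List Int) (cur : Int),
    (sp.foldl (fun (s : List Int × Int) q =>
        let c := max s.2 q.2
        (s.1 ++ [c], c)) (acc, cur)).1 = acc ++ pmSpine cur sp := by
  intro sp
  induction sp with
  | nil => simp [pmSpine]
  | cons q t ih =>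
    intro acc cur
    simp only [List.foldl_cons, pmSpine]
    rw [ih]
    simp

theorem pm_lookup : ∀ (sp : List (Int × Int)) (k : Nat) (cur : Int), k ≤ sp.length →
    (cur :: pmSpine cur sp).getD k 0 = ((sp.take k).map Prod.snd).foldl max cur := by
  intro sp
  induction sp with
  | nil =>
    intro k cur hk
    cases k with
    | zero => simp
    | succ k => simp at hk
  | cons q t ih =>
    intro k cur hk
    cases k with
    | zero => simp
    | succ k =>
      simp only [pmSpine, List.getD_cons_succ, List.take_succ_cons, List.map_cons, List.foldl_cons]
      exact ih k (max cur q.2) (by simpa using hk)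

theorem take_takeWhile {α : Type} (p : α → Bool) :
    ∀ l : List α, l.take (l.takeWhile p).length = l.takeWhile p := by
  intro l
  induction l with
  | nil => simp
  | cons x t ih =>
    by_cases hp : p x = true
    · simp [hp, ih]
    · simp [hp]

theorem core_eq (chefs : List Int) (jobs : List (Int × Int))
    (hpw : jobs.Pairwise (fun a b => a.1 ≤ b.1)) :
    ((PySem.List.sorted chefs (fun x => x) false).foldl
        (fun (s : List (Int × Int) × Int × Int) chef =>
          let w := aWhile chef s.1 s.2.2
          (w.1, s.2.1 + w.2, w.2)) (jobs, 0, 0)).2.1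
    = chefs.foldl (fun res chef =>
        res + ((jobs.foldl (fun (s : List Int × Int) q =>
            let cur := max s.2 q.2
            (s.1 ++ [cur], cur)) ([0], 0)).1).getD
          (brLoop (jobs.map (fun q => q.1)) chef 0 ((jobs.map (fun q => q.1)).length)) 0) 0 := by
  have hdiffs : (jobs.map (fun q => q.1)).Pairwise (· ≤ ·) := by
    rw [List.pairwise_map]; exact hpw
  -- A side: the sweep computes the sum of bestOf over sorted chefs
  have hA : ((PySem.List.sorted chefs (fun x => x) false).foldl
        (fun (s : List (Int × Int) × Int × Int) chef =>
          let w := aWhile chef s.1 s.2.2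
          (w.1, s.2.1 + w.2, w.2)) (jobs, 0, 0)).2.1
      = (((PySem.List.sorted chefs (fun x => x) false)).map (bestOf jobs)).sum := by
    have hp : (PySem.List.sorted chefs (fun x => x) false).Pairwise (· ≤ ·) := by
      simpa using PySem.List.sorted_pairwise chefs (fun x => x)
    have h0 := loopA jobs (PySem.List.sorted chefs (fun x => x) false) (fun _ => false) 0 hp
      (by intro c _ x hx; simp at hx)
    rw [show jobs.dropWhile (fun _ => false) = jobs from by simp,
        show jobs.takeWhile (fun _ => false) = ([] : List (Int × Int)) from by simp] at h0
    simpa using h0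
  rw [hA]
  -- B side: each chef's table lookup is bestOf
  have hv : ∀ chef : Int,
      ((jobs.foldl (fun (s : List Int × Int) q =>
            let cur := max s.2 q.2
            (s.1 ++ [cur], cur)) ([0], 0)).1).getD
          (brLoop (jobs.map (fun q => q.1)) chef 0 ((jobs.map (fun q => q.1)).length)) 0
        = bestOf jobs chef := by
    intro chef
    have htw : (jobs.map (fun q => q.1)).takeWhile (fun x => decide (x ≤ chef))
        = (jobs.takeWhile (pcond chef)).map (fun q => q.1) := by
      rw [List.takeWhile_map]; rfl
    have htlen : ((jobs.map (fun q => q.1)).takeWhile (fun x => decide (x ≤ chef))).length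
        = (jobs.takeWhile (pcond chef)).length := by rw [htw]; simp
    have hbr := brLoop_eq (jobs.map (fun q => q.1)) chef hdiffs
      ((jobs.map (fun q => q.1)).length) 0 ((jobs.map (fun q => q.1)).length)
      (by omega) (by omega)
      (by simpa using (List.takeWhile_sublist (l := jobs.map (fun q => q.1)) (fun x => decide (x ≤ chef))).length_le)
      (le_refl _)
    rw [hbr, htlen]
    rw [foldl_pm]
    have : ((0 : Int) :: pmSpine 0 jobs) = ([0] ++ pmSpine 0 jobs) := by simp
    rw [← this]
    rw [pm_lookup jobs _ 0 ((List.takeWhile_sublist _).length_le)]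
    rw [take_takeWhile]
    rfl
  have hmap : chefs.foldl (fun res chef =>
        res + ((jobs.foldl (fun (s : List Int × Int) q =>
            let cur := max s.2 q.2
            (s.1 ++ [cur], cur)) ([0], 0)).1).getD
          (brLoop (jobs.map (fun q => q.1)) chef 0 ((jobs.map (fun q => q.1)).length)) 0) 0
      = (chefs.map (bestOf jobs)).sum := by
    have := PySem.List.foldl_add chefs (bestOf jobs) 0
    simp only [hv]
    simpa using this
  rw [hmap]
  exact List.Perm.sum_eq (List.Perm.map _ (PySem.List.sorted_perm chefs _ _))


-- ===== VERDICT (by name: the statement is the Claim_ definition above) =====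
theorem getMaxPorift_spec : Claim_equal_getMaxPorift := by
  intro chefs orderScale orderProfit _
  unfold Spec_getMaxPorift getMaxPorift getMaxPorift_alt
  by_cases h1 : chefs = [] ∨ orderScale = [] ∨ orderProfit = []
  · rw [if_pos h1, if_pos h1]
  · rw [if_neg h1, if_neg h1]
    by_cases h2 : chefs.length = 0 ∨ orderScale.length = 0 ∨ orderProfit.length = 0 ∨
        orderProfit.length ≠ orderScale.length
    · rw [if_pos h2, if_pos h2]
    · rw [if_neg h2, if_neg h2]
      exact core_eq chefs _ (PySem.List.sorted_pairwise _ _)
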